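-- pv_equiv track=rewrite | github.com/Clearlangw/openvocabulary_mmdet | ov_toolkits/coop_init.py | find_prompt_segments
-- ===== SOURCE A (Python) =====
-- def find_prompt_segments(pos_ids, prompt_length):
--     """
--     pos_ids: 1D tensor/list, e.g. [0,0,0,1,2,3,4,0,1,2,3,4,5]
--     prompt_length: int
--     return: list of (start, end) indices for each complete [0,1,...,prompt_length-1] segment
--     """
--     segments = []
--     i = 0
--     while i <= len(pos_ids) - prompt_length:
--         # 检查当前位置是否为0，且后面连续prompt_length个数正好是[0,1,...,prompt_length-1]
--         if all(pos_ids[i+j] == j for j in range(prompt_length)):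
--             segments.append((i, i+prompt_length))  # [start, end)
--             i += prompt_length  # 跳过这个段
--         else:
--             i += 1
--     return segments
-- ===== SOURCE B (Python) =====
-- def find_prompt_segments(pos_ids, prompt_length):
--     """One pass, KMP-style automaton: k is the length of the matched prefix of
--     the pattern [0,1,...,prompt_length-1] ending at the current element; a
--     segment is emitted (and k reset) each time k reaches prompt_length."""
--     segments = []
--     k = 0
--     for i, x in enumerate(pos_ids):
--         if x == k:
--             k = k + 1
--         elif x == 0:
--             k = 1
--         else:
--             k = 0
--         if k == prompt_length:
--             segments.append((i + 1 - prompt_length, i + 1))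
--             k = 0
--     return segments
-- ===== Notes on version B (the rewrite author's own statement) =====
-- stated objective: faster
-- what changed: Replaces A's index-driven greedy scan with per-position all(...) window rescans by a single KMP-style pass over the elements that maintains the matched-prefix length k and emits a segment whenever k reaches prompt_length.
import Mathlib
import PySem

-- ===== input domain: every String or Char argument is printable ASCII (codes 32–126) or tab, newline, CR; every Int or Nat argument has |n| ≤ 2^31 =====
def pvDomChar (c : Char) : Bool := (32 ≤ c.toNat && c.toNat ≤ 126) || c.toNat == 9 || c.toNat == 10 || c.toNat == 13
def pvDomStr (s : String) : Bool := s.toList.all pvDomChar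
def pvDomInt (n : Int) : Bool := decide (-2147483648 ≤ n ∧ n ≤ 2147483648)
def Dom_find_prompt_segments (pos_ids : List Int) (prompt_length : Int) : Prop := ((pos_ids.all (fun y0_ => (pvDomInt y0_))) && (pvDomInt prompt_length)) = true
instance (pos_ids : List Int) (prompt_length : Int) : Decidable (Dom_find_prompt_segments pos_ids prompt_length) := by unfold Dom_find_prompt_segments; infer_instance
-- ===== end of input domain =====

-- ===== PORT A =====
-- B replaces A's per-position window rescans by a single KMP-style pass (objective: faster; measured).
-- Port of A's while loop: fuel-driven recursion (fuel = len+1 suffices since i advances by ≥ 1 when prompt_length ≥ 1;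
-- the 'prompt_length ≤ 0 → []' guard only makes the port total: Python A does not terminate there, excluded by Pre_).
def pvLoopA (xs : List Int) (L : Nat) : Nat → Nat → List (Int × Int) → List (Int × Int)
  | 0, _, acc => acc
  | fuel+1, i, acc =>
    if i + L ≤ xs.length then
      if (List.range L).all (fun j => xs.getD (i+j) 0 == (j : Int)) then
        pvLoopA xs L fuel (i + L) (acc ++ [((i : Int), ((i + L : Nat) : Int))])
      else
        pvLoopA xs L fuel (i + 1) acc
    else acc

def find_prompt_segments (pos_ids : List Int) (prompt_length : Int) : List (Int × Int) :=
  if prompt_length ≤ 0 then []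
  else pvLoopA pos_ids prompt_length.toNat (pos_ids.length + 1) 0 []

-- ===== PORT B =====
-- Source B's single for-loop over (i, x) pairs: k = matched prefix length of [0..L-1]; emit and reset when k = L.
def pvScanB (L : Int) : List Int → Nat → Int → List (Int × Int) → List (Int × Int)
  | [], _, _, acc => acc
  | x :: rest, i, k, acc =>
    let k' := if x == k then k + 1 else if x == 0 then 1 else 0
    if k' == L then
      pvScanB L rest (i + 1) 0 (acc ++ [((i : Int) + 1 - L, (i : Int) + 1)])
    else
      pvScanB L rest (i + 1) k' acc

def find_prompt_segments_alt (pos_ids : List Int) (prompt_length : Int) : List (Int × Int) :=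
  pvScanB prompt_length pos_ids 0 0 []

-- ===== PRECONDITION & SPEC =====
-- Pre_ excludes prompt_length ≤ 0, where Python A never terminates (i += prompt_length does not advance).
def Pre_find_prompt_segments (pos_ids : List Int) (prompt_length : Int) : Prop := 1 ≤ prompt_length
instance (pos_ids : List Int) (prompt_length : Int) : Decidable (Pre_find_prompt_segments pos_ids prompt_length) := by unfold Pre_find_prompt_segments; infer_instance
def pvWitness_find_prompt_segments : List Int × Int := ([0, 1, 0, 0, 1, 2, 5], 2)
def Spec_find_prompt_segments (pos_ids : List Int) (prompt_length : Int) (out : List (Int × Int)) : Prop := out = find_prompt_segments_alt pos_ids prompt_length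
instance (pos_ids : List Int) (prompt_length : Int) (out : List (Int × Int)) : Decidable (Spec_find_prompt_segments pos_ids prompt_length out) := by unfold Spec_find_prompt_segments; infer_instance

-- ===== CLAIM (what is proved, stated in full; the proofs are below) =====
def Claim_equal_find_prompt_segments : Prop := ∀ (pos_ids : List Int) (prompt_length : Int), Dom_find_prompt_segments pos_ids prompt_length → Pre_find_prompt_segments pos_ids prompt_length → Spec_find_prompt_segments pos_ids prompt_length (find_prompt_segments pos_ids prompt_length)

-- ===== LEMMAS AND PROOFS =====

-- A's loop is fuel-insensitive once the fuel is sufficient (each step advances i by ≥ 1 since L ≥ 1).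
lemma pvLoopA_fuel (xs : List Int) (L : Nat) (hL : 1 ≤ L) :
    ∀ (f1 f2 i : Nat) (acc : List (Int × Int)),
      xs.length + 1 ≤ i + f1 + L → xs.length + 1 ≤ i + f2 + L →
      pvLoopA xs L f1 i acc = pvLoopA xs L f2 i acc := by
  intro f1
  induction f1 with
  | zero =>
    intro f2 i acc h1 h2
    have hg : ¬ i + L ≤ xs.length := by omega
    cases f2 with
    | zero => rfl
    | succ f => simp only [pvLoopA, if_neg hg]
  | succ f ih =>
    intro f2 i acc h1 h2
    cases f2 with
    | zero =>
      have hg : ¬ i + L ≤ xs.length := by omega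
      simp only [pvLoopA, if_neg hg]
    | succ f2' =>
      simp only [pvLoopA]
      by_cases hg : i + L ≤ xs.length
      · rw [if_pos hg, if_pos hg]
        split
        · exact ih f2' (i + L) _ (by omega) (by omega)
        · exact ih f2' (i + 1) _ (by omega) (by omega)
      · rw [if_neg hg, if_neg hg]

-- A's loop with canonical (always sufficient) fuel
def pvPA (xs : List Int) (L : Nat) (i : Nat) (acc : List (Int × Int)) : List (Int × Int) :=
  pvLoopA xs L (xs.length + 1) i acc

lemma pvPA_step (xs : List Int) (L : Nat) (hL : 1 ≤ L) (i : Nat) (acc : List (Int × Int))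
    (hg : i + L ≤ xs.length) :
    pvPA xs L i acc =
      if (List.range L).all (fun j => xs.getD (i+j) 0 == (j : Int)) then
        pvPA xs L (i + L) (acc ++ [((i : Int), ((i + L : Nat) : Int))])
      else
        pvPA xs L (i + 1) acc := by
  show pvLoopA xs L (xs.length + 1) i acc = _
  simp only [pvLoopA, if_pos hg]
  split
  · exact pvLoopA_fuel xs L hL _ _ _ _ (by omega) (by omega)
  · exact pvLoopA_fuel xs L hL _ _ _ _ (by omega) (by omega)

lemma pvPA_stop (xs : List Int) (L : Nat) (i : Nat) (acc : List (Int × Int))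
    (hg : ¬ i + L ≤ xs.length) : pvPA xs L i acc = acc := by
  show pvLoopA xs L (xs.length + 1) i acc = acc
  simp only [pvLoopA, if_neg hg]

-- skipping a block of pointers whose window check fails
lemma pvPA_skip (xs : List Int) (L : Nat) (hL : 1 ≤ L) :
    ∀ (d a : Nat) (acc : List (Int × Int)),
      (∀ p, a ≤ p → p < a + d → ∃ j, j < L ∧ xs.getD (p + j) 0 ≠ (j : Int)) →
      pvPA xs L a acc = pvPA xs L (a + d) acc := by
  intro d
  induction d with
  | zero => intro a acc _; rfl
  | succ d ih =>
    intro a acc hfail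
    by_cases hg : a + L ≤ xs.length
    · obtain ⟨j, hj, hne⟩ := hfail a (le_refl a) (by omega)
      have hchk : (List.range L).all (fun j => xs.getD (a+j) 0 == (j : Int)) = false := by
        rw [List.all_eq_false]
        exact ⟨j, List.mem_range.mpr hj, by simpa using hne⟩
      rw [pvPA_step xs L hL a acc hg, hchk]
      simp only [Bool.false_eq_true, if_false]
      have := ih (a + 1) acc (fun p h1 h2 => hfail p (by omega) (by omega))
      rw [this]
      congr 1
      omega
    · rw [pvPA_stop xs L a acc hg, pvPA_stop xs L (a + (d + 1)) acc (by omega)]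

-- main invariant: the automaton at (i, k) agrees with A's greedy loop at pointer i - k
lemma pvScan_eq_pvPA (ys : List Int) (L : Nat) (hL : 1 ≤ L) :
    ∀ (rest : List Int) (i k : Nat) (acc : List (Int × Int)),
      rest = ys.drop i → k ≤ i → k < L →
      (∀ j, j < k → ys.getD (i - k + j) 0 = (j : Int)) →
      (∀ p, i - k < p → p < i → ∃ j, j < L ∧ ys.getD (p + j) 0 ≠ (j : Int)) →
      pvScanB (L : Int) rest i (k : Int) acc = pvPA ys L (i - k) acc := by
  intro rest
  induction rest with
  | nil =>
    intro i k acc hdrop hk hkL _ _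
    have hi : ys.length ≤ i := by
      by_contra h
      have h2 := List.drop_eq_getElem_cons (l := ys) (i := i) (by omega)
      rw [← hdrop] at h2
      simp at h2
      omega
    have : ¬ (i - k) + L ≤ ys.length := by omega
    rw [pvPA_stop ys L _ acc this]
    rfl
  | cons x rest' ih =>
    intro i k acc hdrop hk hkL hI1 hI2
    have hi : i < ys.length := by
      by_contra h
      rw [List.drop_eq_nil_of_le (by omega)] at hdrop
      simp at hdrop
    have hcons := List.drop_eq_getElem_cons (l := ys) (i := i) hi
    rw [hcons] at hdrop
    have hx : x = ys[i] := by injection hdrop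
    have hrest : rest' = ys.drop (i + 1) := by injection hdrop
    have hxg : ys.getD i 0 = x := by rw [List.getD_eq_getElem ys 0 hi, hx]
    simp only [pvScanB]
    by_cases hxk : x = (k : Int)
    · -- match continues
      have hbeq : (x == (k : Int)) = true := by simpa using hxk
      rw [hbeq]
      simp only [if_true]
      by_cases hkL1 : k + 1 = L
      · -- full match: emit
        have hbeq2 : (((k : Int) + 1) == (L : Int)) = true := by
          simp only [beq_iff_eq]; omega
        rw [hbeq2]
        simp only [if_true]
        have hg : (i - k) + L ≤ ys.length := by omega
        have hchk : (List.range L).all (fun j => ys.getD ((i - k) + j) 0 == (j : Int)) = true := by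
          rw [List.all_eq_true]
          intro j hjm
          have hj : j < L := List.mem_range.mp hjm
          rcases Nat.lt_or_ge j k with hjk | hjk
          · simpa using hI1 j hjk
          · have hjek : j = k := by omega
            have hidx : i - k + j = i := by omega
            rw [hidx, hxg, hxk, hjek]
            simp
        rw [pvPA_step ys L hL _ acc hg, hchk]
        simp only [if_true]
        have hacc : ((((i - k) : Nat) : Int), (((i - k + L) : Nat) : Int)) =
            ((i : Int) + 1 - (L : Int), (i : Int) + 1) := by
          simp only [Prod.mk.injEq]
          omega
        rw [hacc]
        have hpt : i - k + L = i + 1 := by omega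
        rw [hpt]
        have hIH := ih (i + 1) 0 (acc ++ [((i : Int) + 1 - (L : Int), (i : Int) + 1)])
          hrest (by omega) (by omega) (by intro j hj; omega) (by intro p h1 h2; omega)
        simp only [Nat.cast_zero, Nat.sub_zero] at hIH
        exact hIH
      · -- partial match extends
        have hbeq2 : (((k : Int) + 1) == (L : Int)) = false := by
          simp only [beq_eq_false_iff_ne, ne_eq]
          intro h; apply hkL1; omega
        rw [hbeq2]
        simp only [Bool.false_eq_true, if_false]
        have hI1' : ∀ j, j < k + 1 → ys.getD (i + 1 - (k + 1) + j) 0 = (j : Int) := by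
          intro j hj
          have he : i + 1 - (k + 1) + j = i - k + j := by omega
          rw [he]
          rcases Nat.lt_or_ge j k with h | h
          · exact hI1 j h
          · have hjek : j = k := by omega
            have hidx : i - k + j = i := by omega
            rw [hidx, hxg, hxk, hjek]
        have hI2' : ∀ p, i + 1 - (k + 1) < p → p < i + 1 → ∃ j, j < L ∧ ys.getD (p + j) 0 ≠ (j : Int) := by
          intro p h1 h2
          rcases Nat.lt_or_ge p i with h | h
          · exact hI2 p (by omega) h
          · have hpi : p = i := by omega
            subst hpi
            have hk0 : 0 < k := by omega
            refine ⟨0, by omega, ?_⟩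
            rw [Nat.add_zero, hxg, hxk]
            simp only [Nat.cast_zero, ne_eq, Nat.cast_eq_zero]
            omega
        have hIH := ih (i + 1) (k + 1) acc hrest (by omega) (by omega) hI1' hI2'
        have hc : (((k + 1) : Nat) : Int) = (k : Int) + 1 := by push_cast; ring
        have heq : i + 1 - (k + 1) = i - k := by omega
        rw [hc, heq] at hIH
        exact hIH
    · -- mismatch
      have hbeq : (x == (k : Int)) = false := by simpa using hxk
      rw [hbeq]
      simp only [Bool.false_eq_true, if_false]
      have hfail_head : ∃ j, j < L ∧ ys.getD ((i - k) + j) 0 ≠ (j : Int) := by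
        refine ⟨k, hkL, ?_⟩
        have : i - k + k = i := by omega
        rw [this, hxg]
        exact hxk
      by_cases hx0 : x = 0
      · -- restart at k = 1
        have hk0 : k ≠ 0 := by
          intro h; apply hxk; rw [h, hx0]; rfl
        have hL1 : 1 < L := by
          rcases Nat.lt_or_ge 1 L with h | h
          · exact h
          · exfalso; omega
        have hbeq2 : ((1 : Int) == (L : Int)) = false := by
          simp only [beq_eq_false_iff_ne, ne_eq]
          intro h
          have : L = 1 := by omega
          omega
        have hb0 : (x == (0 : Int)) = true := by simpa using hx0
        rw [hb0]
        simp only [if_true]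
        rw [hbeq2]
        simp only [Bool.false_eq_true, if_false]
        have hskip := pvPA_skip ys L hL k (i - k) acc ?_
        · have he : i - k + k = i := by omega
          rw [he] at hskip
          rw [hskip]
          have := ih (i + 1) 1 acc hrest (by omega) hL1
            (by intro j hj
                have : j = 0 := by omega
                subst this
                simp only [Nat.add_sub_cancel, Nat.add_zero, Nat.cast_zero]
                rw [hxg, hx0])
            (by intro p h1 h2; omega)
          simp only [Nat.cast_one, Nat.add_sub_cancel] at this
          exact this
        · intro p h1 h2
          rcases Nat.eq_or_lt_of_le h1 with h | h
          · rw [← h]; exact hfail_head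
          · exact hI2 p h (by omega)
      · -- restart at k = 0
        have hbeq0 : (x == (0 : Int)) = false := by simpa using hx0
        have hbeq2 : ((0 : Int) == (L : Int)) = false := by
          simp only [beq_eq_false_iff_ne, ne_eq]
          intro h; omega
        rw [hbeq0]
        simp only [Bool.false_eq_true, if_false, hbeq2]
        have hskip := pvPA_skip ys L hL (k + 1) (i - k) acc ?_
        · have he : i - k + (k + 1) = i + 1 := by omega
          rw [he] at hskip
          rw [hskip]
          have := ih (i + 1) 0 acc hrest (by omega) (by omega)
            (by intro j hj; omega) (by intro p h1 h2; omega)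
          simpa using this
        · intro p h1 h2
          rcases Nat.eq_or_lt_of_le h1 with h | h
          · rw [← h]; exact hfail_head
          · rcases Nat.lt_or_ge p i with hpi | hpi
            · exact hI2 p h hpi
            · have : p = i := by omega
              subst this
              refine ⟨0, by omega, ?_⟩
              rw [Nat.add_zero, hxg]
              simpa using hx0

-- ===== VERDICT (by name: the statement is the Claim_ definition above) =====
theorem find_prompt_segments_spec : Claim_equal_find_prompt_segments := by
  intro pos_ids prompt_length _ hpre
  unfold Spec_find_prompt_segments find_prompt_segments find_prompt_segments_alt
  have hne : ¬ prompt_length ≤ 0 := by unfold Pre_find_prompt_segments at hpre; omega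
  rw [if_neg hne]
  have hL : 1 ≤ prompt_length.toNat := by omega
  have hcast : ((prompt_length.toNat : Nat) : Int) = prompt_length := by omega
  have := pvScan_eq_pvPA pos_ids prompt_length.toNat hL pos_ids 0 0 []
    (by simp) (by omega) hL (by intro j hj; omega) (by intro p h1 h2; omega)
  simp only [Nat.cast_zero, hcast] at this
  exact this.symm
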